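-- pv_equiv track=rewrite | github.com/python15/homework | 4/chenqingmei/ComplexSort.py | complexSort
-- ===== SOURCE A (Python) =====
-- def complexSort(src: str):
--     oddNum = []
--     evenNum = []
--     lowerLetter = []
--     upperLetter = []
--     for i in range(len(src)):
--         if src[i].isdigit():
--             oddNum.append(src[i]) if (int.from_bytes(src[i].encode(), 'big')) % 2 else evenNum.append(src[i])
--         elif src[i].isalpha():
--             lowerLetter.append(src[i]) if src[i].islower() else upperLetter.append(src[i])
--     oddNum = sorted(oddNum)
--     evenNum = sorted(evenNum)
--     lowerLetter = sorted(lowerLetter)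
--     upperLetter = sorted(upperLetter)
--     return ''.join(oddNum)+''.join(evenNum)+''.join(lowerLetter)+''.join(upperLetter)
-- ===== SOURCE B (Python) =====
-- def complexSort(src: str):
--     # Counting sort over the fixed 62-character alphabet: one pass of counting,
--     # then emit each relevant character repeated by its count, in output order.
--     counts = {}
--     for ch in src:
--         counts[ch] = counts.get(ch, 0) + 1
--     order = "1357902468abcdefghijklmnopqrstuvwxyzABCDEFGHIJKLMNOPQRSTUVWXYZ"
--     return ''.join(c * counts.get(c, 0) for c in order)
-- ===== Notes on version B (the rewrite author's own statement) =====
-- stated objective: faster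
-- what changed: Replaces bucketing plus four comparison sorts with a single counting pass over the string and a counting-sort emission over the fixed 62-character output alphabet.
import Mathlib
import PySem

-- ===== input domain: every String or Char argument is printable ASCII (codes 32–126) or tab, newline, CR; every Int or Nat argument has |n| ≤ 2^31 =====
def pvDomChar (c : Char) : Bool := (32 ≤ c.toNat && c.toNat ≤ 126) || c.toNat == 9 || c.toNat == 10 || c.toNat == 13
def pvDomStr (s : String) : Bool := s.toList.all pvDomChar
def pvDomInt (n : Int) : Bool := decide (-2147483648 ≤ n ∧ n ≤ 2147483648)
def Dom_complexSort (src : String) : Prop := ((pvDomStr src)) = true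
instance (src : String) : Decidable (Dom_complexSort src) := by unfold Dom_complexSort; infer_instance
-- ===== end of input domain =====

-- B replaces A's four comparison sorts with a single counting pass and a
-- counting-sort emission over the fixed 62-character alphabet (asymptotically faster).

set_option maxRecDepth 10000


-- ===== PORT A =====
-- the for-loop appending to the four buckets, as a foldl over the characters
def complexSortLoop (cs : List Char) (st : List Char × List Char × List Char × List Char) :
    List Char × List Char × List Char × List Char :=
  cs.foldl (fun st c =>
    if PySem.Chars.isdigit c then
      -- int.from_bytes(ch.encode(),'big') is the code point for ASCII input
      if c.toNat % 2 == 1 then (st.1 ++ [c], st.2.1, st.2.2.1, st.2.2.2)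
      else (st.1, st.2.1 ++ [c], st.2.2.1, st.2.2.2)
    else if PySem.Chars.isalpha c then
      if PySem.Chars.islower c then (st.1, st.2.1, st.2.2.1 ++ [c], st.2.2.2)
      else (st.1, st.2.1, st.2.2.1, st.2.2.2 ++ [c])
    else st) st

def complexSort (src : String) : String :=
  let st := complexSortLoop src.toList ([], [], [], [])
  String.ofList (PySem.List.sorted st.1 (fun x => x) ++ PySem.List.sorted st.2.1 (fun x => x)
    ++ PySem.List.sorted st.2.2.1 (fun x => x) ++ PySem.List.sorted st.2.2.2 (fun x => x))

-- ===== PORT B =====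
def complexSort_alt (src : String) : String :=
  let counts := src.toList.foldl (fun (d : PySem.Dict Char Nat) c => d.modify c 0 (· + 1))
    (PySem.Dict.mk [])
  String.ofList ((("1357902468abcdefghijklmnopqrstuvwxyzABCDEFGHIJKLMNOPQRSTUVWXYZ" : String).toList.flatMap
    (fun c => List.replicate (counts.getD c 0) c)))

-- ===== PRECONDITION & SPEC =====
def Spec_complexSort (src : String) (out : String) : Prop := out = complexSort_alt src
instance (src : String) (out : String) : Decidable (Spec_complexSort src out) := by unfold Spec_complexSort; infer_instance

-- ===== CLAIM (what is proved, stated in full; the proofs are below) =====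
def Claim_equal_complexSort : Prop := ∀ (src : String), Dom_complexSort src → Spec_complexSort src (complexSort src)

-- ===== LEMMAS AND PROOFS =====

def oddsAl : List Char := ['1','3','5','7','9']
def evensAl : List Char := ['0','2','4','6','8']
def lowAl : List Char := ['a','b','c','d','e','f','g','h','i','j','k','l','m','n','o','p','q','r','s','t','u','v','w','x','y','z']
def upAl : List Char := ['A','B','C','D','E','F','G','H','I','J','K','L','M','N','O','P','Q','R','S','T','U','V','W','X','Y','Z']

def pOdd (c : Char) : Bool := PySem.Chars.isdigit c && (c.toNat % 2 == 1)
def pEven (c : Char) : Bool := PySem.Chars.isdigit c && !(c.toNat % 2 == 1)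
def pLow (c : Char) : Bool := !PySem.Chars.isdigit c && (PySem.Chars.isalpha c && PySem.Chars.islower c)
def pUp (c : Char) : Bool := !PySem.Chars.isdigit c && (PySem.Chars.isalpha c && !PySem.Chars.islower c)

theorem complexSortLoop_eq (cs : List Char) (o e l u : List Char) :
    complexSortLoop cs (o, e, l, u) =
      (o ++ cs.filter pOdd, e ++ cs.filter pEven, l ++ cs.filter pLow, u ++ cs.filter pUp) := by
  induction cs generalizing o e l u with
  | nil => simp [complexSortLoop]
  | cons c cs ih =>
    simp only [complexSortLoop] at ih ⊢
    rw [List.foldl_cons]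
    by_cases h1 : PySem.Chars.isdigit c = true
    · by_cases h2 : (c.toNat % 2 == 1) = true
      · rw [if_pos h1, if_pos h2, ih]
        simp [pOdd, pEven, pLow, pUp, h1, h2]
      · rw [if_pos h1, if_neg h2, ih]
        simp [pOdd, pEven, pLow, pUp, h1, h2]
    · by_cases h3 : PySem.Chars.isalpha c = true
      · by_cases h4 : PySem.Chars.islower c = true
        · rw [if_neg h1, if_pos h3, if_pos h4, ih]
          simp [pOdd, pEven, pLow, pUp, h1, h3, h4]
        · rw [if_neg h1, if_pos h3, if_neg h4, ih]
          simp [pOdd, pEven, pLow, pUp, h1, h3, h4]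
      · rw [if_neg h1, if_neg h3, ih]
        simp [pOdd, pEven, pLow, pUp, h1, h3]

theorem char_eq_of_toNat {c d : Char} (h : c.toNat = d.toNat) : c = d :=
  Char.ext (UInt32.toNat_inj.mp h)

theorem mem_of_toNat_mem (c : Char) (l : List Char) (h : c.toNat ∈ l.map Char.toNat) : c ∈ l := by
  obtain ⟨d, hd, he⟩ := List.mem_map.mp h
  exact (char_eq_of_toNat he.symm) ▸ hd

theorem pairwise_lt_of_toNat (l : List Char) (h : (l.map Char.toNat).Pairwise (· < ·)) :
    l.Pairwise (· < ·) := by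
  rw [List.pairwise_map] at h
  exact h.imp (fun {a b} hab => by rwa [Char.lt_def, UInt32.lt_iff_toNat_lt])

theorem flatMap_congr_mem {α β : Type} (l : List α) (f g : α → List β)
    (h : ∀ x ∈ l, f x = g x) : l.flatMap f = l.flatMap g := by
  induction l with
  | nil => rfl
  | cons x xs ih =>
    simp only [List.flatMap_cons]
    rw [h x (List.mem_cons_self), ih (fun y hy => h y (List.mem_cons_of_mem _ hy))]

theorem count_flatMap_replicate (al : List Char) (m : List Char) (a : Char) (hnd : al.Nodup) :
    (al.flatMap (fun c => List.replicate (m.count c) c)).count a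
      = if a ∈ al then m.count a else 0 := by
  induction al with
  | nil => simp
  | cons c cs ih =>
    simp only [List.flatMap_cons, List.count_append, List.count_replicate,
      List.nodup_cons] at *
    rcases hnd with ⟨hc, hnd⟩
    rw [ih hnd]
    by_cases hac : c = a
    · subst hac
      simp [hc]
    · have hca : ¬ a = c := fun h => hac h.symm
      simp [List.mem_cons, hac, hca]

theorem pairwise_le_flatMap (al : List Char) (n : Char → Nat) (hal : al.Pairwise (· < ·)) :
    (al.flatMap (fun c => List.replicate (n c) c)).Pairwise (· ≤ ·) := by
  induction al with
  | nil => simp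
  | cons c cs ih =>
    simp only [List.flatMap_cons]
    rcases List.pairwise_cons.mp hal with ⟨hc, hcs⟩
    rw [List.pairwise_append]
    refine ⟨List.pairwise_replicate.mpr (Or.inr le_rfl), ih hcs, ?_⟩
    intro x hx y hy
    obtain ⟨d, hd, hyd⟩ := List.mem_flatMap.mp hy
    rw [List.eq_of_mem_replicate hx, List.eq_of_mem_replicate hyd]
    exact le_of_lt (hc d hd)

theorem sorted_eq_flatMap (al m : List Char) (hal : al.Pairwise (· < ·))
    (hm : ∀ x ∈ m, x ∈ al) :
    PySem.List.sorted m (fun x => x) = al.flatMap (fun c => List.replicate (m.count c) c) := by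
  apply PySem.List.sorted_id_eq_of_perm_of_pairwise
  · rw [List.perm_iff_count]
    intro a
    rw [count_flatMap_replicate al m a hal.nodup]
    by_cases ha : a ∈ al
    · simp [ha]
    · simp [ha]
      exact (List.count_eq_zero.mpr (fun hmem => ha (hm a hmem))).symm
  · exact pairwise_le_flatMap al (fun c => m.count c) hal

theorem block_eq (l : List Char) (p : Char → Bool) (al : List Char)
    (h1 : al.Pairwise (· < ·)) (h2 : ∀ c, p c = true → c ∈ al) (h3 : ∀ c ∈ al, p c = true) :
    PySem.List.sorted (l.filter p) (fun x => x)
      = al.flatMap (fun c => List.replicate (l.count c) c) := by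
  rw [sorted_eq_flatMap al _ h1 (fun x hx => h2 x (List.of_mem_filter hx))]
  exact flatMap_congr_mem _ _ _ (fun c hc => by rw [List.count_filter (h3 c hc)])

theorem mem_oddsAl (c : Char) (h : pOdd c = true) : c ∈ oddsAl := by
  apply mem_of_toNat_mem
  simp only [pOdd, Bool.and_eq_true, PySem.Chars.isdigit, decide_eq_true_eq, beq_iff_eq,
    Char.le_def, UInt32.le_iff_toNat_le] at h
  have e : oddsAl.map Char.toNat = [49, 51, 53, 55, 57] := by decide
  rw [e]
  have hcv : c.toNat = c.val.toNat := rfl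
  have h0 : ('0' : Char).val.toNat = 48 := rfl
  have h9 : ('9' : Char).val.toNat = 57 := rfl
  simp only [List.mem_cons, List.not_mem_nil, or_false]
  omega

theorem mem_evensAl (c : Char) (h : pEven c = true) : c ∈ evensAl := by
  apply mem_of_toNat_mem
  simp only [pEven, Bool.and_eq_true, Bool.not_eq_eq_eq_not, Bool.not_true,
    PySem.Chars.isdigit, decide_eq_true_eq, beq_eq_false_iff_ne, ne_eq,
    Char.le_def, UInt32.le_iff_toNat_le] at h
  have e : evensAl.map Char.toNat = [48, 50, 52, 54, 56] := by decide
  rw [e]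
  have hcv : c.toNat = c.val.toNat := rfl
  have h0 : ('0' : Char).val.toNat = 48 := rfl
  have h9 : ('9' : Char).val.toNat = 57 := rfl
  simp only [List.mem_cons, List.not_mem_nil, or_false]
  omega

theorem mem_lowAl (c : Char) (h : pLow c = true) : c ∈ lowAl := by
  apply mem_of_toNat_mem
  simp only [pLow, Bool.and_eq_true, PySem.Chars.islower, decide_eq_true_eq,
    Char.le_def, UInt32.le_iff_toNat_le] at h
  have e : lowAl.map Char.toNat = List.range' 97 26 := by decide
  rw [e, List.mem_range'_1]
  have hcv : c.toNat = c.val.toNat := rfl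
  have ha : ('a' : Char).val.toNat = 97 := rfl
  have hz : ('z' : Char).val.toNat = 122 := rfl
  omega

theorem mem_upAl (c : Char) (h : pUp c = true) : c ∈ upAl := by
  apply mem_of_toNat_mem
  simp only [pUp, Bool.and_eq_true, PySem.Chars.isalpha, PySem.Chars.isupper,
    PySem.Chars.islower, Bool.or_eq_true, Bool.not_eq_eq_eq_not, Bool.not_true,
    Bool.and_eq_false_iff, decide_eq_true_eq, decide_eq_false_iff_not, not_le,
    Char.le_def, UInt32.le_iff_toNat_le] at h
  have e : upAl.map Char.toNat = List.range' 65 26 := by decide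
  rw [e, List.mem_range'_1]
  have hcv : c.toNat = c.val.toNat := rfl
  have hA : ('A' : Char).val.toNat = 65 := rfl
  have hZ : ('Z' : Char).val.toNat = 90 := rfl
  have ha : ('a' : Char).val.toNat = 97 := rfl
  have hz : ('z' : Char).val.toNat = 122 := rfl
  rcases h with ⟨_, h2 | h2, h3⟩
  · omega
  · omega

theorem order_split :
    ("1357902468abcdefghijklmnopqrstuvwxyzABCDEFGHIJKLMNOPQRSTUVWXYZ" : String).toList
      = oddsAl ++ evensAl ++ lowAl ++ upAl := by decide

theorem pairwise_oddsAl : oddsAl.Pairwise (· < ·) := by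
  apply pairwise_lt_of_toNat
  have e : oddsAl.map Char.toNat = [49, 51, 53, 55, 57] := by decide
  rw [e]; decide

theorem pairwise_evensAl : evensAl.Pairwise (· < ·) := by
  apply pairwise_lt_of_toNat
  have e : evensAl.map Char.toNat = [48, 50, 52, 54, 56] := by decide
  rw [e]; decide

theorem pairwise_lowAl : lowAl.Pairwise (· < ·) := by
  apply pairwise_lt_of_toNat
  have e : lowAl.map Char.toNat = List.range' 97 26 := by decide
  rw [e]; decide

theorem pairwise_upAl : upAl.Pairwise (· < ·) := by
  apply pairwise_lt_of_toNat
  have e : upAl.map Char.toNat = List.range' 65 26 := by decide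
  rw [e]; decide

theorem all_oddsAl : ∀ c ∈ oddsAl, pOdd c = true := by intro c hc; fin_cases hc <;> rfl
theorem all_evensAl : ∀ c ∈ evensAl, pEven c = true := by intro c hc; fin_cases hc <;> rfl
theorem all_lowAl : ∀ c ∈ lowAl, pLow c = true := by intro c hc; fin_cases hc <;> rfl
theorem all_upAl : ∀ c ∈ upAl, pUp c = true := by intro c hc; fin_cases hc <;> rfl

-- ===== VERDICT (by name: the statement is the Claim_ definition above) =====
theorem complexSort_spec : Claim_equal_complexSort := by
  intro src _
  unfold Spec_complexSort complexSort complexSort_alt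
  have hcnt : ∀ v : Char,
      (src.toList.foldl (fun (d : PySem.Dict Char Nat) c => d.modify c 0 (· + 1))
        (PySem.Dict.mk [])).getD v 0 = src.toList.count v := by
    intro v
    rw [PySem.Dict.getD_foldl_modify_add_one_nat]
    have : (PySem.Dict.mk ([] : List (Char × Nat))).getD v 0 = 0 := rfl
    omega
  simp only [complexSortLoop_eq, List.nil_append, hcnt, order_split, List.flatMap_append]
  congr 1
  rw [block_eq src.toList pOdd oddsAl pairwise_oddsAl mem_oddsAl all_oddsAl,
      block_eq src.toList pEven evensAl pairwise_evensAl mem_evensAl all_evensAl,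
      block_eq src.toList pLow lowAl pairwise_lowAl mem_lowAl all_lowAl,
      block_eq src.toList pUp upAl pairwise_upAl mem_upAl all_upAl]
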